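-- pv_equiv track=rewrite | github.com/moe-serifu-circle/moe-serifu-agent | scripts/moduledeps.py | validate_args
-- ===== SOURCE A (Python) =====
-- def validate_args(args):
-- 	srcvar_set = False
-- 	module_set = False
-- 	srcdir_set = False
--
-- 	for n in args:
-- 		if n[0] != "-":
-- 			if srcvar_set:
-- 				if srcdir_set:
-- 					module_set = True
-- 					break
-- 				else:
-- 					srcdir_set = True
-- 			else:
-- 				srcvar_set = True
-- 	return srcvar_set and module_set and srcdir_set
-- ===== SOURCE B (Python) =====
-- def validate_args(args):
-- 	it = iter(args)
-- 	for _ in range(3):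
-- 		if not any(n[0] != "-" for n in it):
-- 			return False
-- 	return True
-- ===== Notes on version B (the rewrite author's own statement) =====
-- stated objective: alternative
-- what changed: Replaces A's single loop with a three-boolean state machine of nested ifs by three staged searches over a shared iterator, each stage consuming it with any() up to the next positional (non-dash) argument; success of all three stages means three positionals exist.
import Mathlib
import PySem

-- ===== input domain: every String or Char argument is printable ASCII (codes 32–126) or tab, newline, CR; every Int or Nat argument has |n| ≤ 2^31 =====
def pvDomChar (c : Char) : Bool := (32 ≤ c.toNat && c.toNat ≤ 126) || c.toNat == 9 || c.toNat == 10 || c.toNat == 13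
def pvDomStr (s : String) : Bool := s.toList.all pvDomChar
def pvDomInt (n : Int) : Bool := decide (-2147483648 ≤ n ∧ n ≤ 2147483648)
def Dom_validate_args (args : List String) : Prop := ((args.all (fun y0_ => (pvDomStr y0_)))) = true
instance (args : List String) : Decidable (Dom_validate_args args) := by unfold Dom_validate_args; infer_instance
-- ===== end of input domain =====

-- B replaces A's single loop with a three-boolean state machine by three staged
-- searches over a shared iterator, each consuming it up to the next non-dash
-- argument (alternative decomposition, same cost and same IndexError points).


-- ===== PORT A =====
-- loop over args with the three booleans (srcvar_set, module_set, srcdir_set);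
-- 'break' becomes returning the state without recursing.  n[0] on an empty
-- string is an IndexError in Python (PySem.Str.pyGet? = none): excluded by Pre_,
-- the port returns the current state there (unreachable under Pre_).
def vaLoopA : List String → Bool → Bool → Bool → Bool × Bool × Bool
  | [], srcvar, module_, srcdir => (srcvar, module_, srcdir)
  | n :: rest, srcvar, module_, srcdir =>
    match PySem.Str.pyGet? n 0 with
    | none => (srcvar, module_, srcdir)
    | some c =>
      if c ≠ '-' then
        if srcvar then
          if srcdir then (srcvar, true, srcdir)   -- module_set = True; break
          else vaLoopA rest srcvar module_ true
        else vaLoopA rest true module_ srcdir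
      else vaLoopA rest srcvar module_ srcdir

def validate_args (args : List String) : Bool :=
  let st := vaLoopA args false false false
  st.1 && st.2.1 && st.2.2

-- ===== PORT B =====
-- the iterator is the remaining list; 'any(n[0] != "-" for n in it)' consumes
-- it up to (and including) the first non-dash argument: vaAny returns
-- (found?, remaining iterator).  n[0] on "" is an IndexError (pyGet? = none):
-- excluded by Pre_, the port stops the stage there (unreachable under Pre_).
def vaAny : List String → Bool × List String
  | [] => (false, [])
  | n :: rest =>
    match PySem.Str.pyGet? n 0 with
    | none => (false, rest)
    | some c => if c ≠ '-' then (true, rest) else vaAny rest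

-- the 'for _ in range(3)' loop of stages
def vaStages : Nat → List String → Bool
  | 0, _ => true
  | k + 1, l =>
    let st := vaAny l
    if st.1 then vaStages k st.2 else false

def validate_args_alt (args : List String) : Bool := vaStages 3 args

-- ===== PRECONDITION & SPEC =====
-- counts arguments that are non-empty and do not start with '-' (used by Pre_ only)
def vaNonDash (s : String) : Bool :=
  match s.toList with
  | [] => false
  | c :: _ => c ≠ '-'

-- Pre_ excludes exactly the inputs on which A raises IndexError: an empty-string
-- argument reached before the early break, i.e. one preceded by fewer than three
-- non-dash arguments (B raises IndexError at the same element there).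
def Pre_validate_args (args : List String) : Prop :=
  ∀ i, (h : i < args.length) → args[i] = "" → 3 ≤ (args.take i).countP vaNonDash
instance (args : List String) : Decidable (Pre_validate_args args) := by unfold Pre_validate_args; infer_instance

def pvWitness_validate_args : List String := ["src", "-v", "mod", "dir"]

def Spec_validate_args (args : List String) (out : Bool) : Prop := out = validate_args_alt args
instance (args : List String) (out : Bool) : Decidable (Spec_validate_args args out) := by unfold Spec_validate_args; infer_instance

-- ===== CLAIM (what is proved, stated in full; the proofs are below) =====
def Claim_equal_validate_args : Prop := ∀ (args : List String), Dom_validate_args args → Pre_validate_args args → Spec_validate_args args (validate_args args)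

-- ===== LEMMAS AND PROOFS =====

-- generalized precondition: j non-dash arguments already consumed
def vaP (l : List String) (j : Nat) : Prop :=
  ∀ i, (h : i < l.length) → l[i] = "" → 3 ≤ j + (l.take i).countP vaNonDash

def vaState : Nat → Bool × Bool × Bool
  | 0 => (false, false, false)
  | 1 => (true, false, false)
  | _ => (true, false, true)

lemma vaLoop_eq (l : List String) : ∀ j : Nat, j < 3 → vaP l j →
    ((vaLoopA l (vaState j).1 (vaState j).2.1 (vaState j).2.2).1
      && (vaLoopA l (vaState j).1 (vaState j).2.1 (vaState j).2.2).2.1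
      && (vaLoopA l (vaState j).1 (vaState j).2.1 (vaState j).2.2).2.2)
      = vaStages (3 - j) l := by
  induction l with
  | nil =>
    intro j hj _
    interval_cases j <;> simp [vaLoopA, vaStages, vaAny, vaState]
  | cons n rest ih =>
    intro j hj hP
    match hnl : n.toList with
    | [] =>
      -- n = "": excluded by vaP at index 0
      exfalso
      have hn : n = "" := String.toList_eq_nil_iff.mp hnl
      have := hP 0 (by simp) (by simpa using hn)
      simp at this
      omega
    | c :: cs =>
      by_cases hc : c = '-'
      · -- dash argument: A's loop skips it; B's current stage's any() skips it
        have hnd : vaNonDash n = false := by simp [vaNonDash, hnl, hc]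
        have hP' : vaP rest j := by
          intro i hi hemp
          have := hP (i + 1) (by simpa using Nat.succ_lt_succ hi) (by simpa using hemp)
          simpa [List.take_succ_cons, hnd] using this
        have hrec := ih j hj hP'
        have hstage : vaStages (3 - j) (n :: rest) = vaStages (3 - j) rest := by
          interval_cases j <;> simp [vaStages, vaAny, hnl, hc]
        rw [hstage]
        interval_cases j <;> simp_all [vaLoopA, vaState]
      · -- non-dash argument: A advances its state; B's current stage succeeds
        have hnd : vaNonDash n = true := by simp [vaNonDash, hnl, hc]
        have hP' : vaP rest (j + 1) := by
          intro i hi hemp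
          have := hP (i + 1) (by simpa using Nat.succ_lt_succ hi) (by simpa using hemp)
          simp [List.take_succ_cons, hnd] at this
          omega
        interval_cases j
        · have hrec := ih 1 (by omega) hP'
          simpa [vaLoopA, vaStages, vaAny, vaState, hnl, hc] using hrec
        · have hrec := ih 2 (by omega) hP'
          simpa [vaLoopA, vaStages, vaAny, vaState, hnl, hc] using hrec
        · -- third non-dash: A breaks with module_set = True; B's last stage succeeds
          simp [vaLoopA, vaStages, vaAny, vaState, hnl, hc]

-- ===== VERDICT (by name: the statement is the Claim_ definition above) =====
theorem validate_args_spec : Claim_equal_validate_args := by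
  intro args _ hPre
  unfold Spec_validate_args validate_args validate_args_alt
  have hP0 : vaP args 0 := by
    intro i h he
    simpa using hPre i h he
  have := vaLoop_eq args 0 (by omega) hP0
  simpa [vaState] using this
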